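-- pv_equiv track=rewrite | github.com/AnkaiJie/Academic-Fraud-Detector | python/Scopus/ReferenceParser.py | splitRefSection
-- ===== SOURCE A (Python) =====
-- def splitRefSection(references):
--     i = 2
--     ref_list = []
--     index = references.find(str(i) + '.')
--     while (index != -1):
--         temp_ref = references [:index]
--         ref_list.append(temp_ref)
--         references = references [index:]
--         i += 1
--         index = references.find(str(i) + '.')
--
--     ref_list.append(references)
--     return ref_list
-- ===== SOURCE B (Python) =====
-- def splitRefSection(references):
--     # Phase 1: collect absolute positions of the sequential markers "2.", "3.", ...
--     positions = []
--     i = 2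
--     start = 0
--     pos = references.find(str(i) + '.', start)
--     while pos != -1:
--         positions.append(pos)
--         start = pos
--         i += 1
--         pos = references.find(str(i) + '.', start)
--     # Phase 2: slice the original string between consecutive boundaries
--     result = []
--     prev = 0
--     for p in positions:
--         result.append(references[prev:p])
--         prev = p
--     result.append(references[prev:])
--     return result
-- ===== Notes on version B (the rewrite author's own statement) =====
-- stated objective: alternative
-- what changed: A repeatedly truncates the string at each found marker and re-searches the suffix; B keeps the original string intact, first collecting the absolute marker boundary positions with find(marker, start) in one pass and then slicing the original string between consecutive boundaries in a second pass.
import Mathlib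
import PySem

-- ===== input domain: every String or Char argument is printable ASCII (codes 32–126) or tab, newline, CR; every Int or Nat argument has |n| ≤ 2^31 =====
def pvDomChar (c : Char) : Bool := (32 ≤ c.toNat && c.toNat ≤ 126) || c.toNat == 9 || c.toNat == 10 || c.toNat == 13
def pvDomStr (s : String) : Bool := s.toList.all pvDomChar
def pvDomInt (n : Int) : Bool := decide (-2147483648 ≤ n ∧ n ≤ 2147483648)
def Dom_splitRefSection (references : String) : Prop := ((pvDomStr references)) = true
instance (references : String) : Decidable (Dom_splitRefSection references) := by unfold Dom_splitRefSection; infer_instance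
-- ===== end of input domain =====

-- B replaces A's truncate-and-research loop by two phases (collect absolute marker
-- positions with find(sub, start), then slice the ORIGINAL string between consecutive
-- boundaries); objective: alternative decomposition, same cost.

-- ===== PORT A =====
-- A's while loop; fuel is only a totality guard (2*len+2 always exceeds the iteration count).
def splitRefSectionLoopA (fuel : Nat) (references : String) (i : Int) (refList : List String) : List String :=
  match fuel with
  | 0 => refList ++ [references]
  | fuel + 1 =>
    let index := PySem.Str.find references (PySem.Int.toStr i ++ ".")
    if index ≠ -1 then
      splitRefSectionLoopA fuel (PySem.Str.slice references (some index) none) (i + 1)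
        (refList ++ [PySem.Str.slice references none (some index)])
    else
      refList ++ [references]

def splitRefSection (references : String) : List String :=
  splitRefSectionLoopA (2 * references.toList.length + 2) references 2 []

-- ===== PORT B =====
-- Phase 1 of B: collect absolute positions via references.find(str(i)+'.', start); same fuel guard.
def splitRefSectionPositions (fuel : Nat) (references : String) (i : Int) (start : Int) : List Int :=
  match fuel with
  | 0 => []
  | fuel + 1 =>
    let pos := PySem.Str.findFrom references (PySem.Int.toStr i ++ ".") start
    if pos ≠ -1 then pos :: splitRefSectionPositions fuel references (i + 1) pos
    else []

def splitRefSection_alt (references : String) : List String :=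
  let positions := splitRefSectionPositions (2 * references.toList.length + 2) references 2 0
  let r := positions.foldl
    (fun (acc : List String × Int) p =>
      (acc.1 ++ [PySem.Str.slice references (some acc.2) (some p)], p)) ([], 0)
  r.1 ++ [PySem.Str.slice references (some r.2) none]

-- ===== PRECONDITION & SPEC =====
def Spec_splitRefSection (references : String) (out : List String) : Prop := out = splitRefSection_alt references
instance (references : String) (out : List String) : Decidable (Spec_splitRefSection references out) := by unfold Spec_splitRefSection; infer_instance

-- ===== CLAIM (what is proved, stated in full; the proofs are below) =====
def Claim_equal_splitRefSection : Prop := ∀ (references : String), Dom_splitRefSection references → Spec_splitRefSection references (splitRefSection references)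

-- ===== LEMMAS AND PROOFS =====

lemma slice_from_eq_ofList_drop (s : String) (prev : Nat) :
    PySem.Str.slice s (some (prev : Int)) none = String.ofList (s.toList.drop prev) := by
  apply String.toList_inj.mp
  simp [PySem.Str.toList_slice, PySem.Chars.slice_eq_listSlice, PySem.List.slice_from_natCast]

lemma loopA_eq_positions (fuel : Nat) (s : String) :
    ∀ (i : Int) (prev : Nat), prev ≤ s.toList.length → ∀ (acc : List String),
    splitRefSectionLoopA fuel (String.ofList (s.toList.drop prev)) i acc
      = (let r := (splitRefSectionPositions fuel s i (prev : Int)).foldl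
            (fun (acc : List String × Int) p =>
              (acc.1 ++ [PySem.Str.slice s (some acc.2) (some p)], p)) (acc, (prev : Int));
         r.1 ++ [PySem.Str.slice s (some r.2) none]) := by
  induction fuel with
  | zero =>
    intro i prev hprev acc
    simp [splitRefSectionLoopA, splitRefSectionPositions, slice_from_eq_ofList_drop]
  | succ fuel ih =>
    intro i prev hprev acc
    have hff : PySem.Str.findFrom s (PySem.Int.toStr i ++ ".") (prev : Int)
        = if PySem.Chars.find (s.toList.drop prev) (PySem.Int.toStr i ++ ".").toList = -1 then -1
          else (prev : Int) + PySem.Chars.find (s.toList.drop prev) (PySem.Int.toStr i ++ ".").toList := by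
      rw [PySem.Str.findFrom_eq, PySem.Chars.findFrom_natCast s.toList _ prev hprev]
    set q := PySem.Chars.find (s.toList.drop prev) (PySem.Int.toStr i ++ ".").toList with hqdef
    have hfind : PySem.Str.find (String.ofList (s.toList.drop prev)) (PySem.Int.toStr i ++ ".") = q := by
      rw [PySem.Str.find_eq, String.toList_ofList]
    by_cases h : q = -1
    · -- marker not found: both sides finish
      simp only [splitRefSectionLoopA, splitRefSectionPositions, hfind, hff, h]
      simp [slice_from_eq_ofList_drop]
    · -- marker found at relative position q ≥ 0
      have hq0 : 0 ≤ q := by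
        have := PySem.Chars.neg_one_le_find (s.toList.drop prev) (PySem.Int.toStr i ++ ".").toList
        omega
      have hqlen : q ≤ ((s.toList.drop prev).length : Int) :=
        PySem.Chars.find_le_length _ _
      have hqn : q = (q.toNat : Int) := (Int.toNat_of_nonneg hq0).symm
      have hsum_ne : (prev : Int) + q ≠ -1 := by omega
      have hprev' : prev + q.toNat ≤ s.toList.length := by
        simp only [List.length_drop] at hqlen
        omega
      -- the new remainder string is the drop at the absolute position
      have hrem : PySem.Str.slice (String.ofList (s.toList.drop prev)) (some q) none
          = String.ofList (s.toList.drop (prev + q.toNat)) := by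
        apply String.toList_inj.mp
        rw [PySem.Str.toList_slice, String.toList_ofList, PySem.Chars.slice_eq_listSlice,
          PySem.List.slice_from _ hq0, String.toList_ofList, List.drop_drop]
      -- the chunk A appends equals B's slice of the original between the boundaries
      have hchunk : PySem.Str.slice (String.ofList (s.toList.drop prev)) none (some q)
          = PySem.Str.slice s (some (prev : Int)) (some ((prev : Int) + q)) := by
        apply String.toList_inj.mp
        rw [PySem.Str.toList_slice, PySem.Str.toList_slice, String.toList_ofList,
          PySem.Chars.slice_eq_listSlice, PySem.Chars.slice_eq_listSlice,
          PySem.List.slice_to _ hq0, hqn, PySem.List.slice_natCast_add]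
        simp
        omega
      simp only [splitRefSectionLoopA, splitRefSectionPositions, hfind, hff, if_neg h,
        if_pos h, hsum_ne, ne_eq, not_false_eq_true, if_true]
      rw [hrem, hchunk]
      have hcast : ((prev + q.toNat : Nat) : Int) = (prev : Int) + q := by
        push_cast
        omega
      have := ih (i + 1) (prev + q.toNat) hprev' (acc ++ [PySem.Str.slice s (some (prev : Int)) (some ((prev : Int) + q))])
      rw [hcast] at this
      simpa using this

-- ===== VERDICT (by name: the statement is the Claim_ definition above) =====
theorem splitRefSection_spec : Claim_equal_splitRefSection := by
  intro references _
  unfold Spec_splitRefSection splitRefSection splitRefSection_alt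
  have h := loopA_eq_positions (2 * references.toList.length + 2) references 2 0 (Nat.zero_le _) []
  simpa using h
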